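-- pv_equiv track=rewrite | github.com/cherylzh0110/AgeEstimationApp | evaluate8classes.py | transferAge
-- ===== SOURCE A (Python) =====
-- def transferAge(Y_age):
--     Y_label = []
--     for i in Y_age:
--         i = int(i)
--         if i <= 2:
--             Y_label.append(0)
--         elif (i>2) and (i<=6):
--             Y_label.append(1)
--         elif (i>6) and (i<15):
--             Y_label.append(2)
--         elif (i>=15) and (i<24):
--             Y_label.append(3)
--         elif (i>=24) and (i<35):
--             Y_label.append(4)
--         elif (i>=35) and (i<45):
--             Y_label.append(5)
--         elif (i>=45) and (i<60):
--             Y_label.append(6)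
--         elif i>=60:
--             Y_label.append(7)
--     return Y_label
-- ===== SOURCE B (Python) =====
-- import bisect
--
-- _CUTOFFS = [2, 6, 14, 23, 34, 44, 59]
--
-- def transferAge(Y_age):
--     return [bisect.bisect_left(_CUTOFFS, int(i)) for i in Y_age]
-- ===== Notes on version B (the rewrite author's own statement) =====
-- stated objective: idiomatic
-- what changed: Replaces the eight-branch chained-comparison loop with a precomputed sorted cutoff table and a binary search (bisect_left) in a comprehension.
import Mathlib
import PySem

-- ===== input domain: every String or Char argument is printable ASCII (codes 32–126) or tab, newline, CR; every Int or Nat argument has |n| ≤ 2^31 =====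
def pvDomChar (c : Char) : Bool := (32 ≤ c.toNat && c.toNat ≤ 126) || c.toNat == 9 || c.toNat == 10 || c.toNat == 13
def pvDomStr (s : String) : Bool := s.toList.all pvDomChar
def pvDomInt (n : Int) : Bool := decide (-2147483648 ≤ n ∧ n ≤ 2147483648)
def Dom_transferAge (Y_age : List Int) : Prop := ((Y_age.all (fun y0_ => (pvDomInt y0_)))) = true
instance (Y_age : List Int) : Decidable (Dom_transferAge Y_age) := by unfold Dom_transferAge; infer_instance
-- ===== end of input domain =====

-- B replaces A's eight-branch comparison chain by a sorted cutoff table queried with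
-- bisect_left in a comprehension; return values proved equal on all Int lists (objective: idiomatic).

-- ===== PORT A =====
def transferAge (Y_age : List Int) : List Int :=
  Y_age.foldl (fun Y_label i =>
    if i ≤ 2 then Y_label ++ [(0 : Int)]
    else if i > 2 ∧ i ≤ 6 then Y_label ++ [1]
    else if i > 6 ∧ i < 15 then Y_label ++ [2]
    else if i ≥ 15 ∧ i < 24 then Y_label ++ [3]
    else if i ≥ 24 ∧ i < 35 then Y_label ++ [4]
    else if i ≥ 35 ∧ i < 45 then Y_label ++ [5]
    else if i ≥ 45 ∧ i < 60 then Y_label ++ [6]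
    else if i ≥ 60 then Y_label ++ [7]
    else Y_label) []

-- ===== PORT B =====
-- the sorted boundary table, built once
def transferAgeCutoffs : List Int := [2, 6, 14, 23, 34, 44, 59]

-- bisect.bisect_left on a sorted list = number of elements strictly below the key
def transferAge_alt (Y_age : List Int) : List Int :=
  Y_age.map (fun i => (transferAgeCutoffs.countP (fun c => c < i) : Int))

-- ===== PRECONDITION & SPEC =====
def Spec_transferAge (Y_age : List Int) (out : List Int) : Prop := out = transferAge_alt Y_age
instance (Y_age : List Int) (out : List Int) : Decidable (Spec_transferAge Y_age out) := by unfold Spec_transferAge; infer_instance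

-- ===== CLAIM (what is proved, stated in full; the proofs are below) =====
def Claim_equal_transferAge : Prop := ∀ (Y_age : List Int), Dom_transferAge Y_age → Spec_transferAge Y_age (transferAge Y_age)

-- ===== LEMMAS AND PROOFS =====
-- one step of A's loop appends exactly the label B computes by counting cutoffs below i
theorem transferAge_step (acc : List Int) (i : Int) :
    (if i ≤ 2 then acc ++ [(0 : Int)]
    else if i > 2 ∧ i ≤ 6 then acc ++ [1]
    else if i > 6 ∧ i < 15 then acc ++ [2]
    else if i ≥ 15 ∧ i < 24 then acc ++ [3]
    else if i ≥ 24 ∧ i < 35 then acc ++ [4]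
    else if i ≥ 35 ∧ i < 45 then acc ++ [5]
    else if i ≥ 45 ∧ i < 60 then acc ++ [6]
    else if i ≥ 60 then acc ++ [7]
    else acc) = acc ++ [(transferAgeCutoffs.countP (fun c => c < i) : Int)] := by
  by_cases h1 : i ≤ 2
  · have e : transferAgeCutoffs.countP (fun c => c < i) = 0 := by
      simp [transferAgeCutoffs, show ¬((2:Int) < i) by omega, show ¬((6:Int) < i) by omega, show ¬((14:Int) < i) by omega, show ¬((23:Int) < i) by omega, show ¬((34:Int) < i) by omega, show ¬((44:Int) < i) by omega, show ¬((59:Int) < i) by omega]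
    rw [if_pos (by omega : i ≤ 2), e]
    norm_num
  by_cases h2 : i ≤ 6
  · have e : transferAgeCutoffs.countP (fun c => c < i) = 1 := by
      simp [transferAgeCutoffs, show (2:Int) < i by omega, show ¬((6:Int) < i) by omega, show ¬((14:Int) < i) by omega, show ¬((23:Int) < i) by omega, show ¬((34:Int) < i) by omega, show ¬((44:Int) < i) by omega, show ¬((59:Int) < i) by omega]
    rw [if_neg (by omega : ¬ i ≤ 2), if_pos (by omega : i > 2 ∧ i ≤ 6), e]
    norm_num
  by_cases h3 : i ≤ 14
  · have e : transferAgeCutoffs.countP (fun c => c < i) = 2 := by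
      simp [transferAgeCutoffs, show (2:Int) < i by omega, show (6:Int) < i by omega, show ¬((14:Int) < i) by omega, show ¬((23:Int) < i) by omega, show ¬((34:Int) < i) by omega, show ¬((44:Int) < i) by omega, show ¬((59:Int) < i) by omega]
    rw [if_neg (by omega : ¬ i ≤ 2), if_neg (by omega : ¬ (i > 2 ∧ i ≤ 6)), if_pos (by omega : i > 6 ∧ i < 15), e]
    norm_num
  by_cases h4 : i ≤ 23
  · have e : transferAgeCutoffs.countP (fun c => c < i) = 3 := by
      simp [transferAgeCutoffs, show (2:Int) < i by omega, show (6:Int) < i by omega, show (14:Int) < i by omega, show ¬((23:Int) < i) by omega, show ¬((34:Int) < i) by omega, show ¬((44:Int) < i) by omega, show ¬((59:Int) < i) by omega]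
    rw [if_neg (by omega : ¬ i ≤ 2), if_neg (by omega : ¬ (i > 2 ∧ i ≤ 6)), if_neg (by omega : ¬ (i > 6 ∧ i < 15)), if_pos (by omega : i ≥ 15 ∧ i < 24), e]
    norm_num
  by_cases h5 : i ≤ 34
  · have e : transferAgeCutoffs.countP (fun c => c < i) = 4 := by
      simp [transferAgeCutoffs, show (2:Int) < i by omega, show (6:Int) < i by omega, show (14:Int) < i by omega, show (23:Int) < i by omega, show ¬((34:Int) < i) by omega, show ¬((44:Int) < i) by omega, show ¬((59:Int) < i) by omega]
    rw [if_neg (by omega : ¬ i ≤ 2), if_neg (by omega : ¬ (i > 2 ∧ i ≤ 6)), if_neg (by omega : ¬ (i > 6 ∧ i < 15)), if_neg (by omega : ¬ (i ≥ 15 ∧ i < 24)), if_pos (by omega : i ≥ 24 ∧ i < 35), e]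
    norm_num
  by_cases h6 : i ≤ 44
  · have e : transferAgeCutoffs.countP (fun c => c < i) = 5 := by
      simp [transferAgeCutoffs, show (2:Int) < i by omega, show (6:Int) < i by omega, show (14:Int) < i by omega, show (23:Int) < i by omega, show (34:Int) < i by omega, show ¬((44:Int) < i) by omega, show ¬((59:Int) < i) by omega]
    rw [if_neg (by omega : ¬ i ≤ 2), if_neg (by omega : ¬ (i > 2 ∧ i ≤ 6)), if_neg (by omega : ¬ (i > 6 ∧ i < 15)), if_neg (by omega : ¬ (i ≥ 15 ∧ i < 24)), if_neg (by omega : ¬ (i ≥ 24 ∧ i < 35)), if_pos (by omega : i ≥ 35 ∧ i < 45), e]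
    norm_num
  by_cases h7 : i ≤ 59
  · have e : transferAgeCutoffs.countP (fun c => c < i) = 6 := by
      simp [transferAgeCutoffs, show (2:Int) < i by omega, show (6:Int) < i by omega, show (14:Int) < i by omega, show (23:Int) < i by omega, show (34:Int) < i by omega, show (44:Int) < i by omega, show ¬((59:Int) < i) by omega]
    rw [if_neg (by omega : ¬ i ≤ 2), if_neg (by omega : ¬ (i > 2 ∧ i ≤ 6)), if_neg (by omega : ¬ (i > 6 ∧ i < 15)), if_neg (by omega : ¬ (i ≥ 15 ∧ i < 24)), if_neg (by omega : ¬ (i ≥ 24 ∧ i < 35)), if_neg (by omega : ¬ (i ≥ 35 ∧ i < 45)), if_pos (by omega : i ≥ 45 ∧ i < 60), e]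
    norm_num
  have e : transferAgeCutoffs.countP (fun c => c < i) = 7 := by
    simp [transferAgeCutoffs, show (2:Int) < i by omega, show (6:Int) < i by omega, show (14:Int) < i by omega, show (23:Int) < i by omega, show (34:Int) < i by omega, show (44:Int) < i by omega, show (59:Int) < i by omega]
  rw [if_neg (by omega : ¬ i ≤ 2), if_neg (by omega : ¬ (i > 2 ∧ i ≤ 6)), if_neg (by omega : ¬ (i > 6 ∧ i < 15)), if_neg (by omega : ¬ (i ≥ 15 ∧ i < 24)), if_neg (by omega : ¬ (i ≥ 24 ∧ i < 35)), if_neg (by omega : ¬ (i ≥ 35 ∧ i < 45)), if_neg (by omega : ¬ (i ≥ 45 ∧ i < 60)), if_pos (by omega : i ≥ 60), e]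
  norm_num

theorem transferAge_foldl (Y_age : List Int) (acc : List Int) :
    Y_age.foldl (fun Y_label i =>
    if i ≤ 2 then Y_label ++ [(0 : Int)]
    else if i > 2 ∧ i ≤ 6 then Y_label ++ [1]
    else if i > 6 ∧ i < 15 then Y_label ++ [2]
    else if i ≥ 15 ∧ i < 24 then Y_label ++ [3]
    else if i ≥ 24 ∧ i < 35 then Y_label ++ [4]
    else if i ≥ 35 ∧ i < 45 then Y_label ++ [5]
    else if i ≥ 45 ∧ i < 60 then Y_label ++ [6]
    else if i ≥ 60 then Y_label ++ [7]
    else Y_label) acc = acc ++ transferAge_alt Y_age := by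
  induction Y_age generalizing acc with
  | nil => simp [transferAge_alt]
  | cons i rest ih =>
    simp only [List.foldl_cons, transferAge_alt, List.map_cons]
    rw [transferAge_step, ih]
    simp [transferAge_alt]

-- ===== VERDICT (by name: the statement is the Claim_ definition above) =====
theorem transferAge_spec : Claim_equal_transferAge := by
  intro Y_age _
  unfold Spec_transferAge transferAge
  rw [transferAge_foldl]
  rfl
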